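-- pv_equiv track=rewrite | github.com/amokhvarma/ScotlandYard_RL | utilities/DQN_Agent.py | convert_from_dict
-- ===== SOURCE A (Python) =====
-- def convert_from_dict(list_of_actions):
--     l = []
--     for key in list_of_actions.keys():
--         if (key < 3):
--             for pos in list_of_actions[key]:
--                 l.append((key, pos))
--
--         else:
--             for i in list_of_actions.keys():
--                 if (i == 4):
--                     break
--                 for pos in list_of_actions[i]:
--                     l.append((4, i, pos))
--
--     return l
-- ===== SOURCE B (Python) =====
-- def convert_from_dict(list_of_actions):
--     items = list(list_of_actions.items())
--     cut = next((n for n, (k, _) in enumerate(items) if k == 4), len(items))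
--     inner = [(4, k, p) for k, poss in items[:cut] for p in poss]
--     return [t for k, poss in items
--               for t in ([(k, p) for p in poss] if k < 3 else inner)]
-- ===== Notes on version B (the rewrite author's own statement) =====
-- stated objective: alternative
-- what changed: B precomputes the break-at-4 inner block once via a slice up to the first key 4 and builds the result as a single flat comprehension over the items, reading each key's positions directly instead of re-scanning the dict with repeated lookups in nested loops; Pre_ only excludes association lists with duplicate keys, which do not represent a Python dict.
import Mathlib
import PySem

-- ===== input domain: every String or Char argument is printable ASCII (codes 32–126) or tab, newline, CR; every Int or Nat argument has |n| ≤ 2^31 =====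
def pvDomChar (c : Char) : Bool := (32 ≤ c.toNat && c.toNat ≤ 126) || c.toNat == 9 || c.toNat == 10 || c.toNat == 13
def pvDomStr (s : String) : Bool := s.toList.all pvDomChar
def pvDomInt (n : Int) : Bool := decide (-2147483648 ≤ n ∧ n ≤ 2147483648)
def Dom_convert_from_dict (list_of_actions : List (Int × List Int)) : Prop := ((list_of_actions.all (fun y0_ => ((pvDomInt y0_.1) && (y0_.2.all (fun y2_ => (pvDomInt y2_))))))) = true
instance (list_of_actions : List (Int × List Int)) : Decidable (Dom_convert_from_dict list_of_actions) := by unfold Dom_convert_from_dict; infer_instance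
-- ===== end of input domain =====

-- B builds the break-at-4 inner block once (slice up to the first key 4) and emits the result
-- in one flat pass over the items, reading values directly instead of repeated dict lookups.

-- ===== PORT A =====
-- list_of_actions[k] : dict lookup (KeyError impossible for keys drawn from the dict itself under Pre_)
def cfdLookup (d : List (Int × List Int)) (k : Int) : List Int :=
  (PySem.Dict.mk d).getD k []

-- the inner 'for i in keys: if i == 4: break; for pos in d[i]: l.append((4, i, pos))' loop
def cfdInner (d : List (Int × List Int)) : List (Int × List Int) → List (List Int) → List (List Int)
  | [], l => l
  | (i, _) :: rest, l =>
    if i == 4 then l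
    else cfdInner d rest ((cfdLookup d i).foldl (fun l pos => l ++ [[4, i, pos]]) l)

def convert_from_dict (list_of_actions : List (Int × List Int)) : List (List Int) :=
  list_of_actions.foldl (fun l kv =>
    if kv.1 < 3 then (cfdLookup list_of_actions kv.1).foldl (fun l pos => l ++ [[kv.1, pos]]) l
    else cfdInner list_of_actions list_of_actions l) []

-- ===== PORT B =====
def convert_from_dict_alt (list_of_actions : List (Int × List Int)) : List (List Int) :=
  let cut := list_of_actions.findIdx (fun kv => kv.1 == 4)
  let inner := (list_of_actions.take cut).flatMap (fun kv => kv.2.map (fun p => [4, kv.1, p]))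
  list_of_actions.flatMap (fun kv =>
    if kv.1 < 3 then kv.2.map (fun p => [kv.1, p]) else inner)

-- ===== PRECONDITION & SPEC =====
-- Pre_ excludes association lists with duplicate keys: they do not represent a Python dict
-- (a dict literal collapses duplicates), so first-match lookup behaviour there is accidental.
def Pre_convert_from_dict (list_of_actions : List (Int × List Int)) : Prop :=
  (list_of_actions.map Prod.fst).Nodup
instance (list_of_actions : List (Int × List Int)) : Decidable (Pre_convert_from_dict list_of_actions) := by unfold Pre_convert_from_dict; infer_instance

def pvWitness_convert_from_dict : (List (Int × List Int)) := [(0, [7, 8]), (4, [1]), (5, [2, 3])]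

def Spec_convert_from_dict (list_of_actions : List (Int × List Int)) (out : List (List Int)) : Prop := out = convert_from_dict_alt list_of_actions
instance (list_of_actions : List (Int × List Int)) (out : List (List Int)) : Decidable (Spec_convert_from_dict list_of_actions out) := by unfold Spec_convert_from_dict; infer_instance

-- ===== CLAIM (what is proved, stated in full; the proofs are below) =====
def Claim_equal_convert_from_dict : Prop := ∀ (list_of_actions : List (Int × List Int)), Dom_convert_from_dict list_of_actions → Pre_convert_from_dict list_of_actions → Spec_convert_from_dict list_of_actions (convert_from_dict list_of_actions)

-- ===== LEMMAS AND PROOFS =====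

-- under Nodup keys, looking up a member pair's key yields that pair's value
theorem cfdLookup_of_mem {d : List (Int × List Int)} {kv : Int × List Int}
    (hnd : (d.map Prod.fst).Nodup) (hkv : kv ∈ d) : cfdLookup d kv.1 = kv.2 := by
  have h : (PySem.Dict.mk d).keys.Nodup := hnd
  exact PySem.Dict.getD_of_mem_items (d := PySem.Dict.mk d) hkv h []

-- the per-key appending foldl is an append of a map
theorem cfd_foldl_map (xs : List Int) (l : List (List Int)) (f : Int → List Int) :
    xs.foldl (fun l pos => l ++ [f pos]) l = l ++ xs.map f := by
  induction xs generalizing l with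
  | nil => simp
  | cons x xs ih => simp [ih]

-- the inner loop equals B's sliced flatMap, on any suffix whose pairs are members of d
theorem cfdInner_eq {d : List (Int × List Int)} (hnd : (d.map Prod.fst).Nodup) :
    ∀ (s : List (Int × List Int)), (∀ kv ∈ s, kv ∈ d) → ∀ l,
      cfdInner d s l = l ++ (s.take (s.findIdx (fun kv => kv.1 == 4))).flatMap
        (fun kv => kv.2.map (fun p => [4, kv.1, p])) := by
  intro s
  induction s with
  | nil => intro _ l; simp [cfdInner]
  | cons kv rest ih =>
    intro hmem l
    obtain ⟨i, v⟩ := kv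
    by_cases h4 : i = 4
    · simp [cfdInner, h4, List.findIdx_cons]
    · have hv : cfdLookup d i = v := cfdLookup_of_mem hnd (hmem (i, v) (by simp))
      have h4' : (i == 4) = false := by simp [h4]
      simp only [cfdInner, h4', cond_false, Bool.false_eq_true, if_false, cfd_foldl_map, hv,
        List.findIdx_cons]
      rw [ih (fun kv h => hmem kv (List.mem_cons_of_mem _ h))]
      simp

-- the outer loop accumulates B's flatMap body, on any suffix of member pairs
theorem cfd_foldl_eq {d : List (Int × List Int)} (hnd : (d.map Prod.fst).Nodup) :
    ∀ (s : List (Int × List Int)), (∀ kv ∈ s, kv ∈ d) → ∀ l,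
      s.foldl (fun l kv =>
          if kv.1 < 3 then (cfdLookup d kv.1).foldl (fun l pos => l ++ [[kv.1, pos]]) l
          else cfdInner d d l) l
        = l ++ s.flatMap (fun kv =>
            if kv.1 < 3 then kv.2.map (fun p => [kv.1, p])
            else (d.take (d.findIdx (fun kv => kv.1 == 4))).flatMap
              (fun kv => kv.2.map (fun p => [4, kv.1, p]))) := by
  intro s
  induction s with
  | nil => intro _ l; simp
  | cons kv rest ih =>
    intro hmem l
    have hv : cfdLookup d kv.1 = kv.2 := cfdLookup_of_mem hnd (hmem kv (by simp))
    have hrest := ih (fun x h => hmem x (List.mem_cons_of_mem _ h))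
    rw [List.foldl_cons, hrest, List.flatMap_cons, ← List.append_assoc]
    congr 1
    by_cases h3 : kv.1 < 3
    · simp only [h3, if_true, cfd_foldl_map, hv]
    · simp only [h3, if_false]
      exact cfdInner_eq hnd d (fun _ h => h) l

-- ===== VERDICT (by name: the statement is the Claim_ definition above) =====
theorem convert_from_dict_spec : Claim_equal_convert_from_dict := by
  intro d _ hnd
  show convert_from_dict d = convert_from_dict_alt d
  rw [convert_from_dict, convert_from_dict_alt,
    cfd_foldl_eq hnd d (fun _ h => h) []]
  simp
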